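-- pv_equiv track=rewrite | github.com/timothyolson/snail_crawl | main.py | generate_target_sequence
-- ===== SOURCE A (Python) =====
-- from typing import List
--
-- def generate_target_sequence(n:int)->List[int]:
--     """
--     Generate a target sequence based on the input value 'n'.
--
--     Args:
--     n (int): The input value.
--
--     Returns:
--     list: The generated target sequence.
--     """
--     if n <= 1:
--         return []
--
--     target = []
--     for i in range(2,n+1):
--         if i == n:
--             target.extend([i] * 3)
--         else:
--             target.extend([i]*2)
--
--
--     return sorted(target,reverse=True)
-- ===== SOURCE B (Python) =====
-- from typing import List
--
-- def generate_target_sequence(n: int) -> List[int]: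
--     # Closed-form: element k of the descending result is n - max(k-1,0)//2,
--     # for k in range(2*n-1); no intermediate list and no sort.
--     if n <= 1:
--         return []
--     return [n - max(k - 1, 0) // 2 for k in range(2 * n - 1)]
-- ===== Notes on version B (the rewrite author's own statement) =====
-- stated objective: alternative
-- what changed: B computes each output element by a closed-form index formula (element k is n - max(k-1,0)//2 over range(2n-1)) instead of building an ascending list with duplicate counts and reverse-sorting it.
import Mathlib
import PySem

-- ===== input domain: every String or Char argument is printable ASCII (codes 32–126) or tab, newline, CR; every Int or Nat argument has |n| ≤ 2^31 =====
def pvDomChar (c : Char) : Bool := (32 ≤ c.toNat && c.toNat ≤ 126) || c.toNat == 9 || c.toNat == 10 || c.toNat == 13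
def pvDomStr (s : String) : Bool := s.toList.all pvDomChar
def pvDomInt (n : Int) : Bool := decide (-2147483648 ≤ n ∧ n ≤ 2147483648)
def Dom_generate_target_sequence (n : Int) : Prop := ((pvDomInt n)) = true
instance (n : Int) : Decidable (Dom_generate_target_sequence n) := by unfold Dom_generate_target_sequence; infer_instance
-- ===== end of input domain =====

-- B computes the result by a closed-form index formula instead of build-then-reverse-sort; return value only.

-- ===== PORT A =====
def generate_target_sequence (n : Int) : List Int :=
  if n ≤ 1 then []
  else
    let target := (PySem.List.pyRange 2 (n + 1) 1).foldl
      (fun acc i => acc ++ (if i = n then [i, i, i] else [i, i])) []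
    PySem.List.sorted target (fun x => x) true

-- ===== PORT B =====
def generate_target_sequence_alt (n : Int) : List Int :=
  if n ≤ 1 then []
  else (PySem.List.pyRange 0 (2 * n - 1) 1).map
    (fun k => n - PySem.Int.floordiv (max (k - 1) 0) 2)

-- ===== PRECONDITION & SPEC =====
def Spec_generate_target_sequence (n : Int) (out : List Int) : Prop := out = generate_target_sequence_alt n
instance (n : Int) (out : List Int) : Decidable (Spec_generate_target_sequence n out) := by unfold Spec_generate_target_sequence; infer_instance

-- ===== CLAIM (what is proved, stated in full; the proofs are below) =====
def Claim_equal_generate_target_sequence : Prop := ∀ (n : Int), Dom_generate_target_sequence n → Spec_generate_target_sequence n (generate_target_sequence n)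

-- ===== LEMMAS AND PROOFS =====

-- flatMap of [i,i] over a strictly decreasing list is weakly decreasing
lemma pairwise_ge_flatMap_pair (l : List Int) (h : l.Pairwise (fun a b => b < a)) :
    (l.flatMap (fun i => [i, i])).Pairwise (fun a b => b ≤ a) := by
  induction l with
  | nil => simp
  | cons x xs ih =>
    rcases List.pairwise_cons.mp h with ⟨hx, hxs⟩
    have hmem : ∀ y ∈ xs.flatMap (fun i => [i, i]), y ≤ x := by
      intro y hy
      rcases List.mem_flatMap.mp hy with ⟨i, hi, hyi⟩
      have : y = i := by simpa using hyi
      exact le_of_lt (this ▸ hx i hi)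
    simp only [List.flatMap_cons, List.cons_append, List.nil_append]
    refine List.pairwise_cons.mpr ⟨?_, List.pairwise_cons.mpr ⟨hmem, ih hxs⟩⟩
    intro y hy
    rcases List.mem_cons.mp hy with h1 | h1
    · exact h1.le
    · exact hmem y h1

-- the descending range is strictly decreasing
lemma pyRange_desc_pairwise (n : Int) :
    (PySem.List.pyRange n 1 (-1)).Pairwise (fun a b => b < a) := by
  rw [PySem.List.pyRange_neg_one_eq_reverse]
  exact List.pairwise_reverse.mpr (PySem.List.pairwise_lt_pyRange_one 2 (n + 1))

-- A's accumulated list (for 2 ≤ n) as a flatMap, with the special last step split off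
lemma a_target_eq (n : Int) (hn : 2 ≤ n) :
    (PySem.List.pyRange 2 (n + 1) 1).foldl
      (fun acc i => acc ++ (if i = n then [i, i, i] else [i, i])) []
    = (PySem.List.pyRange 2 n 1).flatMap (fun i => [i, i]) ++ [n, n, n] := by
  rw [PySem.List.foldl_append_eq_flatMap, PySem.List.pyRange_one_succ_right hn,
      List.flatMap_append]
  simp only [List.nil_append, List.flatMap_cons, List.flatMap_nil, List.append_nil]
  congr 1
  apply List.flatMap_congr
  intro i hi
  have : i < n := (PySem.List.mem_pyRange_one.mp hi).2
  simp [ne_of_lt this]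

-- the descending cons-of-flatMap list is a permutation of A's accumulated list
lemma perm_alt_target (n : Int) (hn : 2 ≤ n) :
    (n :: (PySem.List.pyRange n 1 (-1)).flatMap (fun i => [i, i])).Perm
      ((PySem.List.pyRange 2 n 1).flatMap (fun i => [i, i]) ++ [n, n, n]) := by
  have hperm1 : ((PySem.List.pyRange n 1 (-1)).flatMap (fun i => [i, i])).Perm
      ((PySem.List.pyRange 2 (n + 1) 1).flatMap (fun i => [i, i])) := by
    rw [PySem.List.pyRange_neg_one_eq_reverse]
    exact ((PySem.List.pyRange 2 (n + 1) 1).reverse_perm).flatMap (fun a _ => List.Perm.refl _)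
  have hsplit : (PySem.List.pyRange 2 (n + 1) 1).flatMap (fun i => [i, i])
      = (PySem.List.pyRange 2 n 1).flatMap (fun i => [i, i]) ++ [n, n] := by
    rw [PySem.List.pyRange_one_succ_right hn, List.flatMap_append]
    simp
  have h1 : (n :: (PySem.List.pyRange n 1 (-1)).flatMap (fun i => [i, i])).Perm
      (n :: ((PySem.List.pyRange 2 n 1).flatMap (fun i => [i, i]) ++ [n, n])) :=
    (hperm1.trans (by rw [hsplit])).cons n
  have h2 : (n :: ((PySem.List.pyRange 2 n 1).flatMap (fun i => [i, i]) ++ [n, n])).Perm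
      ((PySem.List.pyRange 2 n 1).flatMap (fun i => [i, i]) ++ [n, n, n]) := by
    have h3 := (List.perm_append_singleton n
      ((PySem.List.pyRange 2 n 1).flatMap (fun i => [i, i]) ++ [n, n])).symm
    have h4 : ((PySem.List.pyRange 2 n 1).flatMap (fun i => [i, i]) ++ [n, n]) ++ [n]
        = (PySem.List.pyRange 2 n 1).flatMap (fun i => [i, i]) ++ [n, n, n] := by
      simp [List.append_assoc]
    exact h4 ▸ h3
  exact h1.trans h2

-- the descending cons-of-flatMap list is weakly decreasing
lemma alt_body_pairwise (n : Int) :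
    (n :: (PySem.List.pyRange n 1 (-1)).flatMap (fun i => [i, i])).Pairwise
      (fun a b => b ≤ a) := by
  refine List.pairwise_cons.mpr ⟨?_, pairwise_ge_flatMap_pair _ (pyRange_desc_pairwise n)⟩
  intro y hy
  rcases List.mem_flatMap.mp hy with ⟨i, hi, hyi⟩
  have hyi' : y = i := by simpa using hyi
  exact hyi' ▸ (PySem.List.mem_pyRange_neg_one.mp hi).2

-- A's result (for 2 ≤ n) is the descending cons-of-flatMap list
lemma a_core (n : Int) (hn : 2 ≤ n) :
    generate_target_sequence n
      = n :: (PySem.List.pyRange n 1 (-1)).flatMap (fun i => [i, i]) := by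
  unfold generate_target_sequence
  rw [if_neg (by omega)]
  refine List.Perm.eq_of_pairwise (fun a b _ _ hab hba => le_antisymm hba hab)
    (PySem.List.sorted_pairwise_rev _ (fun x => x)) (alt_body_pairwise n) ?_
  refine (PySem.List.sorted_perm _ _ _).trans ?_
  rw [a_target_eq n hn]
  exact (perm_alt_target n hn).symm

-- indexing a flatMap of pairs halves the index
lemma flatMap_pair_getElem? (l : List Int) (j : Nat) :
    (l.flatMap (fun x => [x, x]))[j]? = l[j / 2]? := by
  induction l generalizing j with
  | nil => simp
  | cons x xs ih =>
    match j with
    | 0 => simp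
    | 1 => simp
    | (j + 2) =>
      have h2 : (j + 2) / 2 = j / 2 + 1 := by omega
      simp only [List.flatMap_cons, List.cons_append, List.nil_append,
        List.getElem?_cons_succ, h2]
      exact ih j

-- B's closed-form map equals the descending cons-of-flatMap list
lemma alt_eq_core (n : Int) (hn : 2 ≤ n) :
    (PySem.List.pyRange 0 (2 * n - 1) 1).map
        (fun k => n - PySem.Int.floordiv (max (k - 1) 0) 2)
      = n :: (PySem.List.pyRange n 1 (-1)).flatMap (fun i => [i, i]) := by
  apply List.ext_getElem?
  intro i
  rw [PySem.List.pyRange_one, PySem.List.pyRange_neg_one, List.map_map]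
  have hlen : (2 * n - 1 - 0).toNat = 2 * (n - 1).toNat + 1 := by omega
  match i with
  | 0 =>
    rw [List.getElem?_map, List.getElem?_range (by omega)]
    simp [PySem.Int.floordiv]
  | (i + 1) =>
    rw [List.getElem?_cons_succ, flatMap_pair_getElem?, List.getElem?_map,
        List.getElem?_map]
    by_cases hi : i + 1 < (2 * n - 1 - 0).toNat
    · rw [List.getElem?_range hi, List.getElem?_range (by omega)]
      simp only [Option.map_some, Function.comp_apply, Option.some.injEq]
      have hmax : max ((0 : Int) + (↑(i + 1) : Int) - 1) 0 = (i : Int) := by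
        push_cast; omega
      rw [hmax]
      have hfd : PySem.Int.floordiv (i : Int) 2 = ((i / 2 : Nat) : Int) := by
        exact_mod_cast PySem.Int.floordiv_natCast i 2
      rw [hfd]
    · rw [List.getElem?_eq_none (by simp; omega), List.getElem?_eq_none (by simp; omega)]
      rfl

-- ===== VERDICT (by name: the statement is the Claim_ definition above) =====
theorem generate_target_sequence_spec : Claim_equal_generate_target_sequence := by
  intro n _
  unfold Spec_generate_target_sequence generate_target_sequence_alt
  by_cases h : n ≤ 1
  · simp [generate_target_sequence, h]
  · rw [if_neg h, a_core n (by omega), alt_eq_core n (by omega)]
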